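-- pv_equiv track=rewrite | github.com/amdeyk/QCH-based-Secure-Image-carried-Steganographic-Transport | qch/schemes/matrix.py | hamming_syndrome
-- ===== SOURCE A (Python) =====
-- from typing import List
--
-- H = [
--     [1, 1, 1, 1, 0, 0, 0],
--     [1, 1, 0, 0, 1, 1, 0],
--     [1, 0, 1, 0, 1, 0, 1],
-- ]
--
-- def hamming_syndrome(bits7: List[int]) -> List[int]:
--     s = []
--     for row in H:
--         v = 0
--         for b, c in zip(bits7, row):
--             v ^= (b & c)
--         s.append(v & 1)
--     return s
-- ===== SOURCE B (Python) =====
-- # Column-pattern re-implementation: one pass XOR-folding H's columns as 3-bit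
-- # integers instead of three row passes.
-- COL = [0b111, 0b110, 0b101, 0b100, 0b011, 0b010, 0b001]
--
-- def hamming_syndrome(bits7):
--     syn = 0
--     for b, c in zip(bits7, COL):
--         if b & 1:
--             syn ^= c
--     return [(syn >> 2) & 1, (syn >> 1) & 1, syn & 1]
-- ===== Notes on version B (the rewrite author's own statement) =====
-- stated objective: alternative
-- what changed: Instead of three separate XOR passes (one per row of H), B precomputes H's seven columns as 3-bit integers and makes a single pass over zip(bits7, COL), XOR-accumulating the column of each set low bit into one syndrome integer that is then unpacked into the three output bits.
import Mathlib
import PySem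

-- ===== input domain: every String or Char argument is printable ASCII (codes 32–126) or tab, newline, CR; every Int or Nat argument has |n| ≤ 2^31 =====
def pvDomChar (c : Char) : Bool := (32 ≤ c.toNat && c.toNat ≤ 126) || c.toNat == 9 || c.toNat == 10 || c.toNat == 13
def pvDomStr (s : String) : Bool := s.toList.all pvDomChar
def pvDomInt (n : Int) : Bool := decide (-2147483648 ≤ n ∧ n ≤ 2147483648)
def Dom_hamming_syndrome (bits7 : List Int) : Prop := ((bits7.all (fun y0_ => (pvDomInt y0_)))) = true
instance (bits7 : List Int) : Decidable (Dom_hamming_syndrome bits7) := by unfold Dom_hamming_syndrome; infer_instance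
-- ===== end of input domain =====

-- B replaces A's three row passes by one pass that XOR-folds H's columns encoded
-- as 3-bit integers (objective: alternative decomposition, same cost).

-- ===== PORT A =====
-- the module constant H
def pvH : List (List Int) := [[1, 1, 1, 1, 0, 0, 0], [1, 1, 0, 0, 1, 1, 0], [1, 0, 1, 0, 1, 0, 1]]

def hamming_syndrome (bits7 : List Int) : List Int :=
  pvH.foldl (fun s row =>
    let v := (List.zip bits7 row).foldl
      (fun v bc => PySem.Int.bxor v (PySem.Int.band bc.1 bc.2)) 0
    s ++ [PySem.Int.band v 1]) []

-- ===== PORT B =====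
-- the module constant COL
def pvCOL : List Int := [7, 6, 5, 4, 3, 2, 1]

def hamming_syndrome_alt (bits7 : List Int) : List Int :=
  let syn := (List.zip bits7 pvCOL).foldl
    (fun syn bc => if PySem.Int.band bc.1 1 ≠ 0 then PySem.Int.bxor syn bc.2 else syn) 0
  [PySem.Int.band (syn >>> 2) 1, PySem.Int.band (syn >>> 1) 1, PySem.Int.band syn 1]

-- ===== PRECONDITION & SPEC =====
def Spec_hamming_syndrome (bits7 : List Int) (out : List Int) : Prop := out = hamming_syndrome_alt bits7
instance (bits7 : List Int) (out : List Int) : Decidable (Spec_hamming_syndrome bits7 out) := by unfold Spec_hamming_syndrome; infer_instance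

-- ===== CLAIM (what is proved, stated in full; the proofs are below) =====
def Claim_equal_hamming_syndrome : Prop := ∀ (bits7 : List Int), Dom_hamming_syndrome bits7 → Spec_hamming_syndrome bits7 (hamming_syndrome bits7)

-- ===== LEMMAS AND PROOFS =====

-- the low bit of any Python int is 0 or 1
theorem pv_band1_cases (b : Int) : PySem.Int.band b 1 = 0 ∨ PySem.Int.band b 1 = 1 := by
  rw [PySem.Int.band_one]
  have h1 : 0 ≤ PySem.Int.mod b 2 := PySem.Int.mod_nonneg b (by norm_num)
  have h2 : PySem.Int.mod b 2 < 2 := PySem.Int.mod_lt b (by norm_num)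
  omega

-- ===== VERDICT (by name: the statement is the Claim_ definition above) =====
theorem hamming_syndrome_spec : Claim_equal_hamming_syndrome := by
  intro bits7 _
  show hamming_syndrome bits7 = hamming_syndrome_alt bits7
  obtain _ | ⟨b0, bits7⟩ := bits7
  · decide
  obtain _ | ⟨b1, bits7⟩ := bits7
  · rcases pv_band1_cases b0 with h0 | h0 <;>
      simp [hamming_syndrome, hamming_syndrome_alt, pvH, pvCOL, h0] <;> decide
  obtain _ | ⟨b2, bits7⟩ := bits7
  · rcases pv_band1_cases b0 with h0 | h0 <;> rcases pv_band1_cases b1 with h1 | h1 <;>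
      simp [hamming_syndrome, hamming_syndrome_alt, pvH, pvCOL, h0, h1] <;> decide
  obtain _ | ⟨b3, bits7⟩ := bits7
  · rcases pv_band1_cases b0 with h0 | h0 <;> rcases pv_band1_cases b1 with h1 | h1 <;>
      rcases pv_band1_cases b2 with h2 | h2 <;>
      simp [hamming_syndrome, hamming_syndrome_alt, pvH, pvCOL, h0, h1, h2] <;> decide
  obtain _ | ⟨b4, bits7⟩ := bits7
  · rcases pv_band1_cases b0 with h0 | h0 <;> rcases pv_band1_cases b1 with h1 | h1 <;>
      rcases pv_band1_cases b2 with h2 | h2 <;> rcases pv_band1_cases b3 with h3 | h3 <;>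
      simp [hamming_syndrome, hamming_syndrome_alt, pvH, pvCOL, h0, h1, h2, h3] <;> decide
  obtain _ | ⟨b5, bits7⟩ := bits7
  · rcases pv_band1_cases b0 with h0 | h0 <;> rcases pv_band1_cases b1 with h1 | h1 <;>
      rcases pv_band1_cases b2 with h2 | h2 <;> rcases pv_band1_cases b3 with h3 | h3 <;>
      rcases pv_band1_cases b4 with h4 | h4 <;>
      simp [hamming_syndrome, hamming_syndrome_alt, pvH, pvCOL, h0, h1, h2, h3, h4] <;> decide
  obtain _ | ⟨b6, bits7⟩ := bits7
  · rcases pv_band1_cases b0 with h0 | h0 <;> rcases pv_band1_cases b1 with h1 | h1 <;>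
      rcases pv_band1_cases b2 with h2 | h2 <;> rcases pv_band1_cases b3 with h3 | h3 <;>
      rcases pv_band1_cases b4 with h4 | h4 <;> rcases pv_band1_cases b5 with h5 | h5 <;>
      simp [hamming_syndrome, hamming_syndrome_alt, pvH, pvCOL, h0, h1, h2, h3, h4, h5] <;> decide
  · rcases pv_band1_cases b0 with h0 | h0 <;> rcases pv_band1_cases b1 with h1 | h1 <;>
      rcases pv_band1_cases b2 with h2 | h2 <;> rcases pv_band1_cases b3 with h3 | h3 <;>
      rcases pv_band1_cases b4 with h4 | h4 <;> rcases pv_band1_cases b5 with h5 | h5 <;>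
      rcases pv_band1_cases b6 with h6 | h6 <;>
      simp [hamming_syndrome, hamming_syndrome_alt, pvH, pvCOL, h0, h1, h2, h3, h4, h5, h6] <;> decide
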